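-- pv_equiv track=rewrite | github.com/nnyiam10/advent-of-code | aoc/2025/day_04/solution.py | part2
-- ===== SOURCE A (Python) =====
-- def part2(puzzle_input):
--     first_pass, total = True, 0
--     removed_not_null = False
--     removed = []
--     while first_pass or removed_not_null:
--         removed_not_null = False
--         dir = [(-1, -1), (-1, 1), (1, -1), (1, 1), (0, 1), (1, 0), (0, -1), (-1, 0)]
--         m, n = len(puzzle_input), len(puzzle_input[0])
--         for i in range(m):
--             for j in range(n):
--                 if puzzle_input[i][j] == "@":
--                     surrounding = 0
--                     for dx, dy in dir:
--                         if (0 <= i+dx < m and 0 <= j+dy < n) and puzzle_input[i+dx][j+dy] == "@":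
--                             surrounding += 1
--                     if surrounding < 4:
--                         total += 1
--                         removed.append((i, j))
--
--         if removed:
--             removed_not_null = True
--             for a, b in removed:
--                 puzzle_input[a][b] = '.'
--             removed = []
--
--         if first_pass:
--             first_pass = False
--     return total
-- ===== SOURCE B (Python) =====
-- def part2(puzzle_input):
--     # Worklist peeling of the 4-core: instead of rescanning the whole grid in
--     # synchronous rounds like A, keep a stack of cells to examine; when a cell
--     # is removed, only its live neighbors are pushed for re-examination, so no
--     # cell is ever rescanned unless a neighbor of it was removed. Does not
--     # mutate the input (A rewrites removed cells to '.'); equivalence is about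
--     # the return value.
--     m, n = len(puzzle_input), len(puzzle_input[0])
--     dirs = ((-1, -1), (-1, 0), (-1, 1), (0, -1), (0, 1), (1, -1), (1, 0), (1, 1))
--     alive = {(i, j) for i in range(m) for j in range(n) if puzzle_input[i][j] == "@"}
--     stack = [(i, j) for i in range(m) for j in range(n) if puzzle_input[i][j] == "@"]
--     removed = 0
--     while stack:
--         c = stack.pop()
--         if c not in alive:
--             continue
--         i, j = c
--         nbs = [(i + dx, j + dy) for dx, dy in dirs if (i + dx, j + dy) in alive]
--         if len(nbs) < 4:
--             alive.discard(c)
--             removed += 1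
--             stack.extend(nbs)
--     return removed
-- ===== Notes on version B (the rewrite author's own statement) =====
-- stated objective: alternative
-- what changed: B replaces A's synchronous rounds of full-grid rescans (which mutate removed cells to '.') by worklist peeling: a stack of cells to examine from which a removed cell pushes only its live neighbors, so a cell is re-examined only when one of its neighbors was removed; the peeled 4-core is unique, so the removal count agrees.
import Mathlib
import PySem

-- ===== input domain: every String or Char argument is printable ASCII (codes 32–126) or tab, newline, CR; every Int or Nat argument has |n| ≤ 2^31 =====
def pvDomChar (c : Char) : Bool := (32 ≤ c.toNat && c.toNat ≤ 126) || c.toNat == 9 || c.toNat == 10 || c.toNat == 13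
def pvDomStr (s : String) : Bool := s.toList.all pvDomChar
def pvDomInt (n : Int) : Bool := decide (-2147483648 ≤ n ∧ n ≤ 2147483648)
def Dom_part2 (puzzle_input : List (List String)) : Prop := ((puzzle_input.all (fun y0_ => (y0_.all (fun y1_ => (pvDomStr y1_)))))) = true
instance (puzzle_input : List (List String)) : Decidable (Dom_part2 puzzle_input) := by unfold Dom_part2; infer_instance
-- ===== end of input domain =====

-- B replaces A's synchronous rounds of full-grid rescans by worklist peeling (a stack of
-- cells to re-examine, a removed cell pushing only its live neighbors); same return value.
-- A mutates its argument in place, B does not: the equivalence proved here is about the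
-- RETURN value only.

-- ===== PORT A =====
-- puzzle_input[i][j]; indices here are always ≥ 0 and in range under Pre_ (Python raises
-- otherwise; the getD defaults are never the value Python sees on admitted inputs).
def pvCell (g : List (List String)) (i j : Int) : String :=
  PySem.List.pyGetD (PySem.List.pyGetD g i []) j ""

-- the coordinate view of the grid, '(i, j) for i in range(m) for j in range(n) if
-- puzzle_input[i][j] == "@"': A uses it only in proofs / termination, B's set and stack
-- comprehensions are exactly this generator (its elements are pairwise distinct)
def pvLive (g : List (List String)) (m n : Int) : List (Int × Int) :=
  (PySem.List.pyRange 0 m 1).flatMap (fun i =>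
    (PySem.List.pyRange 0 n 1).filterMap (fun j =>
      if pvCell g i j = "@" then some (i, j) else none))

def pvDirA : List (Int × Int) := [(-1,-1),(-1,1),(1,-1),(1,1),(0,1),(1,0),(0,-1),(-1,0)]

def pvSurr (g : List (List String)) (m n i j : Int) : Int :=
  pvDirA.foldl (fun s d =>
    if (0 ≤ i + d.1 ∧ i + d.1 < m ∧ 0 ≤ j + d.2 ∧ j + d.2 < n) ∧ pvCell g (i + d.1) (j + d.2) = "@"
    then s + 1 else s) 0

-- the two nested 'for' loops of one while-iteration, threading (total, removed)
def pvScan (g : List (List String)) (m n : Int) (st : Int × List (Int × Int)) :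
    Int × List (Int × Int) :=
  (PySem.List.pyRange 0 m 1).foldl (fun st i =>
    (PySem.List.pyRange 0 n 1).foldl (fun st j =>
      if pvCell g i j = "@" then
        if pvSurr g m n i j < 4 then (st.1 + 1, st.2 ++ [(i, j)]) else st
      else st) st) st

-- puzzle_input[a][b] = '.'; a, b come from ranges, hence ≥ 0: .toNat is exact here
def pvWrite (g : List (List String)) (c : Int × Int) : List (List String) :=
  g.set c.1.toNat ((g.getD c.1.toNat []).set c.2.toNat ".")

def pvRemoved (g : List (List String)) (m n : Int) : List (Int × Int) :=
  (pvLive g m n).filter (fun c => decide (pvSurr g m n c.1 c.2 < 4))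

-- (termination helpers for pvLoopA, cited by decreasing_by, and their support lemmas;
-- Lean's linear elaboration forces them above the definition of pvLoopA)

theorem pv_cell_nonneg (g : List (List String)) (i j : Int) (hi : 0 ≤ i) (hj : 0 ≤ j) :
    pvCell g i j = ((g[i.toNat]?.getD [])[j.toNat]?).getD "" := by
  simp [pvCell, PySem.List.pyGetD, PySem.List.pyGet?_of_nonneg _ hi,
    PySem.List.pyGet?_of_nonneg _ hj, List.getD_eq_getElem?_getD]

theorem pv_mem_live (g : List (List String)) (m n : Int) (c : Int × Int) :
    c ∈ pvLive g m n ↔ 0 ≤ c.1 ∧ c.1 < m ∧ 0 ≤ c.2 ∧ c.2 < n ∧ pvCell g c.1 c.2 = "@" := by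
  obtain ⟨i, j⟩ := c
  simp only [pvLive, List.mem_flatMap, List.mem_filterMap, PySem.List.mem_pyRange_one]
  constructor
  · rintro ⟨a, ⟨ha0, ham⟩, b, ⟨hb0, hbn⟩, hif⟩
    by_cases h : pvCell g a b = "@" <;> simp [h] at hif
    · obtain ⟨rfl, rfl⟩ := hif; exact ⟨ha0, ham, hb0, hbn, h⟩
  · rintro ⟨h1, h2, h3, h4, h5⟩
    exact ⟨i, ⟨h1, h2⟩, j, ⟨h3, h4⟩, by simp [h5]⟩

theorem pv_live_nodup (g : List (List String)) (m n : Int) : (pvLive g m n).Nodup := by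
  refine List.nodup_flatMap.2 ⟨fun i _ => ?_, ?_⟩
  · refine List.Nodup.filterMap ?_ (PySem.List.nodup_pyRange_one 0 n)
    intro a a' b hb hb'
    by_cases h : pvCell g i a = "@" <;> simp [h] at hb
    by_cases h' : pvCell g i a' = "@" <;> simp [h'] at hb'
    obtain rfl := hb
    exact ((Prod.mk.injEq _ _ _ _).mp hb').2.symm
  · refine (PySem.List.pairwise_lt_pyRange_one 0 m).imp ?_
    intro a b hab x hx hx'
    simp only [List.mem_filterMap] at hx hx'
    obtain ⟨j, _, hj⟩ := hx; obtain ⟨j', _, hj'⟩ := hx'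
    by_cases h : pvCell g a j = "@" <;> simp [h] at hj
    by_cases h' : pvCell g b j' = "@" <;> simp [h'] at hj'
    obtain rfl := hj
    have := ((Prod.mk.injEq _ _ _ _).mp hj').1
    omega

-- generic shapes of the two nested accumulator loops
theorem pv_foldl_pair_ite {α β : Type} (l : List α) (p : α → Bool) (f : α → β) :
    ∀ (t : Int) (acc : List β),
      l.foldl (fun st x => if p x then (st.1 + 1, st.2 ++ [f x]) else st) (t, acc)
        = (t + ((l.filter p).length : Int), acc ++ (l.filter p).map f) := by
  induction l with
  | nil => simp
  | cons a l ih =>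
    intro t acc
    by_cases h : p a
    · simp only [List.foldl_cons, if_pos h, ih, List.filter_cons, h, if_true, List.map_cons]
      refine Prod.ext ?_ ?_ <;> simp <;> omega
    · simp [h, ih]

theorem pv_foldl_pair_append {α β : Type} (l : List α) (R : α → List β) :
    ∀ (t : Int) (acc : List β),
      l.foldl (fun st x => (st.1 + ((R x).length : Int), st.2 ++ R x)) (t, acc)
        = (t + ((l.flatMap R).length : Int), acc ++ l.flatMap R) := by
  induction l with
  | nil => simp
  | cons a l ih =>
    intro t acc
    simp only [List.foldl_cons, ih, List.flatMap_cons]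
    refine Prod.ext ?_ ?_ <;> simp <;> omega

theorem pv_filterMap_ite {α β : Type} (l : List α) (p : α → Prop) [DecidablePred p] (f : α → β) :
    l.filterMap (fun x => if p x then some (f x) else none)
      = (l.filter (fun x => decide (p x))).map f := by
  induction l with
  | nil => rfl
  | cons a l ih => by_cases h : p a <;> simp [h, ih]

theorem pv_scan_eq (g : List (List String)) (m n : Int) (t : Int) (acc : List (Int × Int)) :
    pvScan g m n (t, acc) = (t + (pvRemoved g m n).length, acc ++ pvRemoved g m n) := by
  have hin : ∀ (st : Int × List (Int × Int)) (i : Int),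
      (PySem.List.pyRange 0 n 1).foldl (fun st j =>
        if pvCell g i j = "@" then
          if pvSurr g m n i j < 4 then (st.1 + 1, st.2 ++ [(i, j)]) else st
        else st) st
      = (st.1 + (((PySem.List.pyRange 0 n 1).filter
            (fun j => decide (pvCell g i j = "@") && decide (pvSurr g m n i j < 4))).length : Int),
         st.2 ++ ((PySem.List.pyRange 0 n 1).filter
            (fun j => decide (pvCell g i j = "@") && decide (pvSurr g m n i j < 4))).map (fun j => (i, j))) := by
    intro st i
    have hf : (fun (st : Int × List (Int × Int)) j =>
        if pvCell g i j = "@" then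
          if pvSurr g m n i j < 4 then (st.1 + 1, st.2 ++ [(i, j)]) else st
        else st)
      = (fun (st : Int × List (Int × Int)) j =>
          if (decide (pvCell g i j = "@") && decide (pvSurr g m n i j < 4)) then
            (st.1 + 1, st.2 ++ [(i, j)]) else st) := by
      funext st j
      by_cases h1 : pvCell g i j = "@" <;> by_cases h2 : pvSurr g m n i j < 4 <;> simp [h1, h2]
    rw [hf, ← Prod.mk.eta (p := st), pv_foldl_pair_ite]
  unfold pvScan
  have hout : (fun (st : Int × List (Int × Int)) i =>
      (PySem.List.pyRange 0 n 1).foldl (fun st j =>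
        if pvCell g i j = "@" then
          if pvSurr g m n i j < 4 then (st.1 + 1, st.2 ++ [(i, j)]) else st
        else st) st)
    = (fun (st : Int × List (Int × Int)) i =>
        (st.1 + ((((PySem.List.pyRange 0 n 1).filter
            (fun j => decide (pvCell g i j = "@") && decide (pvSurr g m n i j < 4))).map (fun j => (i, j))).length : Int),
         st.2 ++ ((PySem.List.pyRange 0 n 1).filter
            (fun j => decide (pvCell g i j = "@") && decide (pvSurr g m n i j < 4))).map (fun j => (i, j)))) := by
    funext st i
    rw [hin st i]
    simp
  rw [hout, pv_foldl_pair_append]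
  have hrem : pvRemoved g m n
      = (PySem.List.pyRange 0 m 1).flatMap (fun i =>
          ((PySem.List.pyRange 0 n 1).filter
            (fun j => decide (pvCell g i j = "@") && decide (pvSurr g m n i j < 4))).map (fun j => (i, j))) := by
    unfold pvRemoved pvLive
    rw [List.filter_flatMap]
    congr 1
    funext i
    rw [pv_filterMap_ite, List.filter_map, List.filter_filter]
    congr 1
    apply List.filter_congr
    intro j _
    simp [Function.comp, Bool.and_comm]
  rw [hrem]

theorem pv_cell_write (g : List (List String)) (a b i j : Int)
    (ha : 0 ≤ a) (hb : 0 ≤ b) (hi : 0 ≤ i) (hj : 0 ≤ j) (hat : pvCell g a b = "@") :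
    pvCell (pvWrite g (a, b)) i j = if i = a ∧ j = b then "." else pvCell g i j := by
  rw [pv_cell_nonneg g a b ha hb] at hat
  have hrow : a.toNat < g.length := by
    by_contra h
    rw [List.getElem?_eq_none (l := g) (by omega)] at hat
    simp at hat
  have hcol : b.toNat < (g[a.toNat]?.getD []).length := by
    by_contra h
    rw [List.getElem?_eq_none (l := g[a.toNat]?.getD []) (by omega)] at hat
    simp at hat
  rw [pv_cell_nonneg _ i j hi hj, pv_cell_nonneg g i j hi hj]
  have hgd : g.getD a.toNat [] = g[a.toNat]?.getD [] := by rw [List.getD_eq_getElem?_getD]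
  show (((g.set a.toNat ((g.getD a.toNat []).set b.toNat "."))[i.toNat]?.getD [])[j.toNat]?).getD ""
      = _
  rw [List.getElem?_set]
  by_cases hia : i = a
  · have hai : a.toNat = i.toNat := by omega
    rw [if_pos hai, ← hai, if_pos hrow]
    simp only [Option.getD_some]
    rw [hgd, List.getElem?_set]
    by_cases hjb : j = b
    · have hbj : b.toNat = j.toNat := by omega
      rw [if_pos hbj, ← hbj, if_pos hcol]
      simp [hia, hjb]
    · have hbj : ¬ b.toNat = j.toNat := by omega
      rw [if_neg hbj]
      simp [hia, hjb]
  · have hai : ¬ a.toNat = i.toNat := by omega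
    rw [if_neg hai]
    simp [hia]

theorem pv_cell_writes (rs : List (Int × Int)) :
    ∀ g, rs.Nodup →
      (∀ c ∈ rs, 0 ≤ c.1 ∧ 0 ≤ c.2 ∧ pvCell g c.1 c.2 = "@") →
      ∀ i j, 0 ≤ i → 0 ≤ j →
        pvCell (rs.foldl pvWrite g) i j = if (i, j) ∈ rs then "." else pvCell g i j := by
  induction rs with
  | nil => simp
  | cons c cs ih =>
    intro g hnd hall i j hi hj
    obtain ⟨c1, c2⟩ := c
    obtain ⟨hc1, hc2, hcat⟩ := hall (c1, c2) (List.mem_cons_self ..)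
    have hstep : ∀ x y, 0 ≤ x → 0 ≤ y →
        pvCell (pvWrite g (c1, c2)) x y = if x = c1 ∧ y = c2 then "." else pvCell g x y :=
      fun x y hx hy => pv_cell_write g c1 c2 x y hc1 hc2 hx hy hcat
    have hall' : ∀ c' ∈ cs, 0 ≤ c'.1 ∧ 0 ≤ c'.2 ∧ pvCell (pvWrite g (c1, c2)) c'.1 c'.2 = "@" := by
      intro c' hc'
      obtain ⟨h1, h2, h3⟩ := hall c' (List.mem_cons_of_mem _ hc')
      refine ⟨h1, h2, ?_⟩
      rw [hstep c'.1 c'.2 h1 h2, if_neg]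
      · exact h3
      · rintro ⟨e1, e2⟩
        exact (List.nodup_cons.1 hnd).1 (by rwa [show (c1, c2) = c' from Prod.ext e1.symm e2.symm])
    rw [List.foldl_cons, ih (pvWrite g (c1, c2)) (List.nodup_cons.1 hnd).2 hall' i j hi hj,
      hstep i j hi hj]
    by_cases h1 : (i, j) ∈ cs <;> by_cases h2 : i = c1 ∧ j = c2 <;>
      simp [h1, h2, List.mem_cons] <;> tauto

theorem pv_removed_sub (g : List (List String)) (m n : Int) :
    ∀ c ∈ pvRemoved g m n, 0 ≤ c.1 ∧ 0 ≤ c.2 ∧ pvCell g c.1 c.2 = "@" := by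
  intro c hc
  have := (pv_mem_live g m n c).1 (List.mem_filter.1 hc).1
  exact ⟨this.1, this.2.2.1, this.2.2.2.2⟩

theorem pv_live_write (g : List (List String)) (m n m' n' : Int) :
    pvLive ((pvRemoved g m n).foldl pvWrite g) m' n'
      = (pvLive g m' n').filter (fun c => !decide (c ∈ pvRemoved g m n)) := by
  have hnd : (pvRemoved g m n).Nodup := (pv_live_nodup g m n).filter _
  have hcell := pv_cell_writes (pvRemoved g m n) g hnd (pv_removed_sub g m n)
  unfold pvLive
  rw [List.filter_flatMap]
  apply List.flatMap_congr
  intro i hi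
  have hi0 : 0 ≤ i := (PySem.List.mem_pyRange_one.1 hi).1
  rw [pv_filterMap_ite, pv_filterMap_ite, List.filter_map, List.filter_filter]
  congr 1
  apply List.filter_congr
  intro j hj
  have hj0 : 0 ≤ j := (PySem.List.mem_pyRange_one.1 hj).1
  rw [hcell i j hi0 hj0]
  by_cases hm : (i, j) ∈ pvRemoved g m n
  · simp [hm]
  · simp [hm, Function.comp]

theorem pv_write_len1 (g : List (List String)) (c : Int × Int) :
    (pvWrite g c).length = g.length ∧ ((pvWrite g c)[0]?.getD []).length = (g[0]?.getD []).length := by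
  unfold pvWrite
  refine ⟨by simp, ?_⟩
  rw [List.getElem?_set]
  by_cases h : c.1.toNat = 0
  · rw [if_pos h]
    by_cases h0 : c.1.toNat < g.length
    · rw [if_pos h0]
      simp only [Option.getD_some, List.length_set]
      rw [h] at h0
      rw [h, List.getD_eq_getElem?_getD, List.getElem?_eq_getElem h0]
    · rw [if_neg h0]
      rw [h] at h0
      rw [List.getElem?_eq_none (l := g) (by omega)]
  · rw [if_neg h]

theorem pv_write_len (g : List (List String)) (rs : List (Int × Int)) :
    ((rs.foldl pvWrite g).length : Int) = (g.length : Int) ∧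
    ((PySem.List.pyGetD (rs.foldl pvWrite g) 0 []).length : Int)
      = ((PySem.List.pyGetD g 0 []).length : Int) := by
  suffices h : (rs.foldl pvWrite g).length = g.length ∧
      ((rs.foldl pvWrite g)[0]?.getD []).length = (g[0]?.getD []).length by
    refine ⟨by exact_mod_cast h.1, ?_⟩
    rw [PySem.List.pyGetD_zero, PySem.List.pyGetD_zero, List.getD_eq_getElem?_getD,
      List.getD_eq_getElem?_getD]
    exact_mod_cast h.2
  induction rs generalizing g with
  | nil => exact ⟨rfl, rfl⟩
  | cons c cs ih =>
    rw [List.foldl_cons]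
    obtain ⟨e1, e2⟩ := pv_write_len1 g c
    obtain ⟨f1, f2⟩ := ih (pvWrite g c)
    exact ⟨f1.trans e1, f2.trans e2⟩

theorem pv_live_write_lt (g : List (List String))
    (h : pvRemoved g g.length ((PySem.List.pyGetD g 0 []).length : Int) ≠ []) :
    (pvLive ((pvRemoved g g.length ((PySem.List.pyGetD g 0 []).length : Int)).foldl pvWrite g)
        (((pvRemoved g g.length ((PySem.List.pyGetD g 0 []).length : Int)).foldl pvWrite g).length : Int)
        ((PySem.List.pyGetD ((pvRemoved g g.length ((PySem.List.pyGetD g 0 []).length : Int)).foldl pvWrite g) 0 []).length : Int)).length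
      < (pvLive g g.length ((PySem.List.pyGetD g 0 []).length : Int)).length := by
  set m : Int := (g.length : Int)
  set n : Int := ((PySem.List.pyGetD g 0 []).length : Int)
  obtain ⟨hlen, hrow⟩ := pv_write_len g (pvRemoved g m n)
  rw [hlen, hrow, pv_live_write g m n m n, List.length_filter_lt_length_iff_exists]
  obtain ⟨c, hc⟩ := List.exists_mem_of_ne_nil _ h
  exact ⟨c, (List.mem_filter.1 hc).1, by simp [hc]⟩

-- the while loop: state (first_pass, removed_not_null, total, grid); removed is always []
-- at the top of the body (Python resets it), so it lives inside the body only
def pvLoopA (fp rnn : Bool) (total : Int) (g : List (List String)) : Int :=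
  if fp || rnn then
    let m : Int := g.length
    let n : Int := ((PySem.List.pyGetD g 0 []).length : Int)
    let res := pvScan g m n (total, [])
    if res.2 ≠ [] then
      pvLoopA false true res.1 (res.2.foldl pvWrite g)
    else
      pvLoopA false false res.1 g
  else total
termination_by 2 * (pvLive g g.length ((PySem.List.pyGetD g 0 []).length : Int)).length
    + (if fp then 1 else 0) + (if rnn then 1 else 0)
decreasing_by
  · have h1 := pv_scan_eq g g.length ((PySem.List.pyGetD g 0 []).length : Int) total []
    have h2 : res.2 = pvRemoved g g.length ((PySem.List.pyGetD g 0 []).length : Int) := by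
      show (pvScan g (g.length : Int) ((PySem.List.pyGetD g 0 []).length : Int) (total, [])).2 = _
      rw [h1]; simp
    have h3 := pv_live_write_lt g (by rw [← h2]; assumption)
    rw [h2]
    rcases fp with _|_ <;> rcases rnn with _|_ <;> simp <;> omega
  · rcases fp with _|_ <;> rcases rnn with _|_ <;> simp_all

def part2 (puzzle_input : List (List String)) : Int :=
  pvLoopA true false 0 puzzle_input

-- ===== PORT B =====
def pvDirB : List (Int × Int) := [(-1,-1),(-1,0),(-1,1),(0,-1),(0,1),(1,-1),(1,0),(1,1)]

-- nbs = [(i+dx, j+dy) for dx, dy in dirs if (i+dx, j+dy) in alive]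
def pvNbsB (alive : PySem.Set (Int × Int)) (i j : Int) : List (Int × Int) :=
  (pvDirB.filter (fun d => PySem.Set.contains alive (i + d.1, j + d.2))).map
    (fun d => (i + d.1, j + d.2))

-- (termination helpers for pvLoopB, cited by decreasing_by)
theorem pv_discard_length_lt (s : PySem.Set (Int × Int)) (c : Int × Int)
    (h : PySem.Set.contains s c = true) :
    (PySem.Set.discard s c).length < s.length := by
  have hc : c ∈ s := (PySem.Set.contains_iff s c).1 h
  show (s.filter _).length < s.length
  rw [List.length_filter_lt_length_iff_exists]
  exact ⟨c, hc, by simp⟩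

theorem pv_nbs_len_le (alive : PySem.Set (Int × Int)) (i j : Int) :
    (pvNbsB alive i j).length ≤ 8 := by
  have h := List.length_filter_le (fun d => PySem.Set.contains alive (i + d.1, j + d.2)) pvDirB
  simpa [pvNbsB] using h.trans (by decide)

-- the while loop; Python's 'c = stack.pop()' is 'stack.getLast', the popped stack is
-- 'stack.dropLast', and 'stack.extend(nbs)' is '++ nbs'
def pvLoopB (alive : PySem.Set (Int × Int)) (stack : List (Int × Int)) (removed : Int) : Int :=
  if h : stack = [] then removed
  else
    if PySem.Set.contains alive (stack.getLast h) then
      if (pvNbsB alive (stack.getLast h).1 (stack.getLast h).2).length < 4 then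
        pvLoopB (PySem.Set.discard alive (stack.getLast h))
          (stack.dropLast ++ pvNbsB alive (stack.getLast h).1 (stack.getLast h).2)
          (removed + 1)
      else pvLoopB alive stack.dropLast removed
    else pvLoopB alive stack.dropLast removed
termination_by 9 * alive.length + stack.length
decreasing_by
  · have h1 := pv_discard_length_lt alive (stack.getLast h) (by assumption)
    have h2 := pv_nbs_len_le alive (stack.getLast h).1 (stack.getLast h).2
    have h3 : stack.dropLast.length + 1 = stack.length := by
      have := congrArg List.length (List.dropLast_append_getLast h)
      simpa using this
    simp only [List.length_append]
    omega
  · have h3 : stack.dropLast.length + 1 = stack.length := by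
      have := congrArg List.length (List.dropLast_append_getLast h)
      simpa using this
    omega
  · have h3 : stack.dropLast.length + 1 = stack.length := by
      have := congrArg List.length (List.dropLast_append_getLast h)
      simpa using this
    omega

def part2_alt (puzzle_input : List (List String)) : Int :=
  let m : Int := puzzle_input.length
  let n : Int := ((PySem.List.pyGetD puzzle_input 0 []).length : Int)
  let alive : PySem.Set (Int × Int) := PySem.Set.ofList (pvLive puzzle_input m n)
  let stack : List (Int × Int) := pvLive puzzle_input m n
  pvLoopB alive stack 0

-- ===== PRECONDITION & SPEC =====
-- Pre_ excludes exactly the inputs where Python A raises IndexError: the empty outer list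
-- (puzzle_input[0]) and grids with a row shorter than row 0 (puzzle_input[i][j], j < n).
def Pre_part2 (puzzle_input : List (List String)) : Prop :=
  puzzle_input ≠ [] ∧
    ∀ r ∈ puzzle_input, (puzzle_input.headD []).length ≤ r.length
instance (puzzle_input : List (List String)) : Decidable (Pre_part2 puzzle_input) := by
  unfold Pre_part2; infer_instance

def pvWitness_part2 : List (List String) :=
  [["@", "@", "."], ["@", "@", "@"], [".", "@", "@"]]

def Spec_part2 (puzzle_input : List (List String)) (out : Int) : Prop := out = part2_alt puzzle_input
instance (puzzle_input : List (List String)) (out : Int) : Decidable (Spec_part2 puzzle_input out) := by unfold Spec_part2; infer_instance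

-- ===== CLAIM (what is proved, stated in full; the proofs are below) =====
def Claim_equal_part2 : Prop := ∀ (puzzle_input : List (List String)), Dom_part2 puzzle_input → Pre_part2 puzzle_input → Spec_part2 puzzle_input (part2 puzzle_input)

-- ===== LEMMAS AND PROOFS =====

-- number of live 8-neighbors of c in the coordinate set S
def pvDeg (S : List (Int × Int)) (c : Int × Int) : Nat :=
  pvDirB.countP (fun d => decide ((c.1 + d.1, c.2 + d.2) ∈ S))

-- one synchronous round and its fixpoint (A's rounds, used only in the proofs)
def pvKeep (l : List (Int × Int)) : List (Int × Int) :=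
  l.filter (fun c => decide (4 ≤ pvDeg l c))

theorem pvKeep_length_le (l : List (Int × Int)) : (pvKeep l).length ≤ l.length :=
  List.length_filter_le _ _

def pvPeel (live : List (Int × Int)) : List (Int × Int) :=
  let keep := pvKeep live
  if keep.length = live.length then live else pvPeel keep
termination_by live.length
decreasing_by
  rename_i h
  have hle := pvKeep_length_le live
  have hk : keep = pvKeep live := rfl
  rw [hk] at h
  omega

theorem pv_peel_eq (live : List (Int × Int)) :
    pvPeel live = if (pvKeep live).length = live.length then live else pvPeel (pvKeep live) := by
  rw [pvPeel]

theorem pv_surr_eq (g : List (List String)) (m n i j : Int) :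
    pvSurr g m n i j = ((pvDeg (pvLive g m n) (i, j) : Nat) : Int) := by
  have hperm : pvDirA.Perm pvDirB := by decide
  rw [pvDeg, ← hperm.countP_eq]
  unfold pvSurr
  have hf : (fun (s : Int) (d : Int × Int) =>
      if (0 ≤ i + d.1 ∧ i + d.1 < m ∧ 0 ≤ j + d.2 ∧ j + d.2 < n) ∧ pvCell g (i + d.1) (j + d.2) = "@"
      then s + 1 else s)
    = (fun (s : Int) (d : Int × Int) =>
        if (fun d : Int × Int => decide (((i, j).1 + d.1, (i, j).2 + d.2) ∈ pvLive g m n)) d = true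
        then s + 1 else s) := by
    funext s d
    have : (((i, j).1 + d.1, (i, j).2 + d.2) ∈ pvLive g m n)
        ↔ (0 ≤ i + d.1 ∧ i + d.1 < m ∧ 0 ≤ j + d.2 ∧ j + d.2 < n)
            ∧ pvCell g (i + d.1) (j + d.2) = "@" := by
      rw [pv_mem_live]
      constructor
      · rintro ⟨a, b, c, d, e⟩; exact ⟨⟨a, b, c, d⟩, e⟩
      · rintro ⟨⟨a, b, c, d⟩, e⟩; exact ⟨a, b, c, d, e⟩
    by_cases h : ((i, j).1 + d.1, (i, j).2 + d.2) ∈ pvLive g m n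
    · rw [if_pos (this.1 h)]; simp [h]
    · rw [if_neg (fun hc => h (this.2 hc))]; simp [h]
  rw [hf, PySem.List.foldl_count_if]
  simp

theorem pv_keep_eq (g : List (List String)) (m n : Int) :
    pvKeep (pvLive g m n)
      = (pvLive g m n).filter (fun c => !decide (pvSurr g m n c.1 c.2 < 4)) := by
  unfold pvKeep
  apply List.filter_congr
  intro c _
  rw [Bool.eq_iff_iff]
  have hs := pv_surr_eq g m n c.1 c.2
  rw [show ((c.1, c.2) : Int × Int) = c from rfl] at hs
  rw [hs]
  simp only [decide_eq_true_eq, Bool.not_eq_true', decide_eq_false_iff_not, not_lt]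
  exact ⟨fun h => by exact_mod_cast h, fun h => by exact_mod_cast h⟩

theorem pv_filter_split (l : List (Int × Int)) (p : Int × Int → Bool) :
    (l.filter p).length + (l.filter (fun c => !p c)).length = l.length := by
  rw [← List.countP_eq_length_filter, ← List.countP_eq_length_filter,
    List.length_eq_countP_add_countP p]
  congr 1
  apply List.countP_congr
  intro x _
  simp

theorem pv_main (N : Nat) :
    ∀ (g : List (List String)) (t : Int) (fp rnn : Bool),
      (pvLive g g.length ((PySem.List.pyGetD g 0 []).length : Int)).length ≤ N →
      (fp || rnn) = true →
      pvLoopA fp rnn t g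
        = t + ((pvLive g g.length ((PySem.List.pyGetD g 0 []).length : Int)).length : Int)
            - ((pvPeel (pvLive g g.length ((PySem.List.pyGetD g 0 []).length : Int))).length : Int) := by
  induction N with
  | zero =>
    intro g t fp rnn hN hfr
    set m : Int := (g.length : Int) with hm
    set n : Int := ((PySem.List.pyGetD g 0 []).length : Int) with hn
    have hnil : pvLive g m n = [] := List.length_eq_zero_iff.1 (Nat.le_zero.1 hN)
    have hrem : pvRemoved g m n = [] := by unfold pvRemoved; rw [hnil]; rfl
    rw [pvLoopA, if_pos hfr]
    simp only [← hm, ← hn, pv_scan_eq g m n t [], List.nil_append, hrem]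
    simp only [ne_eq, not_true_eq_false, if_false, List.length_nil]
    rw [pvLoopA, if_neg (by simp)]
    rw [pv_peel_eq, if_pos (by rw [hnil]; rfl), hnil]
    simp
  | succ N ih =>
    intro g t fp rnn hN hfr
    set m : Int := (g.length : Int) with hm
    set n : Int := ((PySem.List.pyGetD g 0 []).length : Int) with hn
    rw [pvLoopA, if_pos hfr]
    simp only [← hm, ← hn, pv_scan_eq g m n t [], List.nil_append]
    by_cases hrem : pvRemoved g m n = []
    · simp only [hrem, ne_eq, not_true_eq_false, if_false, List.length_nil]
      rw [pvLoopA, if_neg (by simp)]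
      have hall : ∀ c ∈ pvLive g m n, ¬ (decide (pvSurr g m n c.1 c.2 < 4)) = true := by
        intro c hc hp
        have : c ∈ pvRemoved g m n := List.mem_filter.2 ⟨hc, hp⟩
        rw [hrem] at this
        exact absurd this (List.not_mem_nil)
      have hkeep : pvKeep (pvLive g m n) = pvLive g m n := by
        rw [pv_keep_eq g m n]
        apply List.filter_eq_self.2
        intro c hc
        simp [hall c hc]
      rw [pv_peel_eq, if_pos (by rw [hkeep])]
      simp
    · simp only [ne_eq, hrem, not_false_eq_true, if_true]
      -- the grid after this round
      set g' := (pvRemoved g m n).foldl pvWrite g with hg'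
      obtain ⟨hlen, hrow⟩ := pv_write_len g (pvRemoved g m n)
      have hm' : ((g'.length : Nat) : Int) = m := by rw [← hg'] at hlen; exact hlen
      have hn' : (((PySem.List.pyGetD g' 0 []).length : Nat) : Int) = n := by
        rw [← hg'] at hrow; exact hrow
      have hlive' : pvLive g' (g'.length : Int) ((PySem.List.pyGetD g' 0 []).length : Int)
          = pvKeep (pvLive g m n) := by
        rw [hm', hn', hg', pv_live_write g m n m n, pv_keep_eq g m n]
        apply List.filter_congr
        intro c hc
        by_cases hp : decide (pvSurr g m n c.1 c.2 < 4) = true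
        · have : c ∈ pvRemoved g m n := List.mem_filter.2 ⟨hc, hp⟩
          simp [this, hp]
        · have : c ∉ pvRemoved g m n := fun hmem => hp (List.mem_filter.1 hmem).2
          simp [this, hp]
      have hquot : (pvRemoved g m n).length + (pvKeep (pvLive g m n)).length
          = (pvLive g m n).length := by
        rw [pv_keep_eq g m n]
        exact pv_filter_split (pvLive g m n) _
      have hlt : (pvKeep (pvLive g m n)).length < (pvLive g m n).length := by
        have hpos : 0 < (pvRemoved g m n).length := List.length_pos_iff.2 hrem
        omega
      have hN' : (pvLive g' (g'.length : Int) ((PySem.List.pyGetD g' 0 []).length : Int)).length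
          ≤ N := by
        rw [hlive']
        omega
      rw [ih g' (t + ((pvRemoved g m n).length : Int)) false true hN' rfl]
      rw [hlive']
      rw [pv_peel_eq (pvLive g m n), if_neg (by omega)]
      push_cast
      omega

-- ===== the worklist side =====

theorem pv_deg_mono (S T : List (Int × Int)) (h : ∀ x ∈ S, x ∈ T) (c : Int × Int) :
    pvDeg S c ≤ pvDeg T c := by
  apply List.countP_mono_left
  intro d _ hd
  simp only [decide_eq_true_eq] at hd ⊢
  exact h _ hd

-- pvPeel l : a sublist of l, nodup when l is, and self-supporting (every member has ≥ 4
-- neighbors inside it)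
theorem pv_peel_props (N : Nat) :
    ∀ l : List (Int × Int), l.length ≤ N →
      (∀ x ∈ pvPeel l, x ∈ l) ∧ (l.Nodup → (pvPeel l).Nodup) ∧
        (∀ c ∈ pvPeel l, 4 ≤ pvDeg (pvPeel l) c) := by
  induction N with
  | zero =>
    intro l hl
    obtain rfl : l = [] := List.length_eq_zero_iff.1 (Nat.le_zero.1 hl)
    rw [pv_peel_eq]
    simp [pvKeep]
  | succ N ih =>
    intro l hl
    rw [pv_peel_eq]
    by_cases hk : (pvKeep l).length = l.length
    · rw [if_pos hk]
      refine ⟨fun x hx => hx, fun h => h, ?_⟩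
      intro c hc
      have := (List.length_filter_eq_length_iff.1 hk) c hc
      simpa using this
    · rw [if_neg hk]
      have hlt : (pvKeep l).length < l.length :=
        lt_of_le_of_ne (pvKeep_length_le l) hk
      obtain ⟨h1, h2, h3⟩ := ih (pvKeep l) (by omega)
      exact ⟨fun x hx => List.mem_of_mem_filter (h1 x hx),
        fun hnd => h2 (hnd.filter _), h3⟩

-- pvPeel l is the GREATEST self-supporting subset of l
theorem pv_peel_greatest (N : Nat) :
    ∀ (l S : List (Int × Int)), l.length ≤ N → (∀ x ∈ S, x ∈ l) →
      (∀ c ∈ S, 4 ≤ pvDeg S c) → ∀ x ∈ S, x ∈ pvPeel l := by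
  induction N with
  | zero =>
    intro l S hl hSl _ x hx
    obtain rfl : l = [] := List.length_eq_zero_iff.1 (Nat.le_zero.1 hl)
    exact absurd (hSl x hx) (List.not_mem_nil)
  | succ N ih =>
    intro l S hl hSl hsup x hx
    rw [pv_peel_eq]
    by_cases hk : (pvKeep l).length = l.length
    · rw [if_pos hk]
      exact hSl x hx
    · rw [if_neg hk]
      have hlt : (pvKeep l).length < l.length :=
        lt_of_le_of_ne (pvKeep_length_le l) hk
      have hSk : ∀ y ∈ S, y ∈ pvKeep l := by
        intro y hy
        refine List.mem_filter.2 ⟨hSl y hy, ?_⟩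
        have h4 : 4 ≤ pvDeg l y := le_trans (hsup y hy) (pv_deg_mono S l hSl y)
        simpa using h4
      exact ih (pvKeep l) S (by omega) hSk hsup x hx

theorem pv_discard_mem (s : PySem.Set (Int × Int)) (c x : Int × Int) :
    x ∈ PySem.Set.discard s c ↔ x ∈ s ∧ x ≠ c :=
  PySem.Set.mem_discard s c x

theorem pv_discard_len (s : PySem.Set (Int × Int)) (c : Int × Int)
    (hnd : s.Nodup) (hc : c ∈ s) :
    (PySem.Set.discard s c).length + 1 = s.length := by
  have h1 : s.count c = 1 := List.count_eq_one_of_mem hnd hc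
  have h2 : (PySem.Set.discard s c).length = s.countP (fun y => !(y == c)) := by
    simp [PySem.Set.discard, List.countP_eq_length_filter]
  have hsplit := List.length_eq_countP_add_countP (l := s) (p := fun y => y == c)
  have hcount : s.countP (fun y => y == c) = 1 := by
    simpa [List.count] using h1
  have hbridge : s.countP (fun a => decide ¬((a == c) = true)) = s.countP (fun y => !(y == c)) := by
    apply List.countP_congr; intro x _; simp
  omega

-- stack = [] : all remaining live cells are supported, so alive IS the 4-core of live0
theorem pv_loopB_nil (alive : PySem.Set (Int × Int)) (removed : Int)
    (live0 : List (Int × Int))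
    (hl0 : live0.Nodup) (ha : alive.Nodup)
    (hsub : ∀ x ∈ alive, x ∈ live0)
    (hpeel : ∀ x ∈ pvPeel live0, x ∈ alive)
    (hstk : ∀ c ∈ alive, pvDeg alive c < 4 → (c ∈ ([] : List (Int × Int)))) :
    pvLoopB alive [] removed
      = removed + (alive.length : Int) - ((pvPeel live0).length : Int) := by
  obtain ⟨hp1, hp2, hp3⟩ := pv_peel_props live0.length live0 le_rfl
  have hsup : ∀ c ∈ alive, 4 ≤ pvDeg alive c := by
    intro c hc
    by_contra h
    exact absurd (hstk c hc (by omega)) (List.not_mem_nil)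
  have hinpeel : ∀ x ∈ alive, x ∈ pvPeel live0 :=
    pv_peel_greatest live0.length live0 alive le_rfl hsub hsup
  have hlen : alive.length = (pvPeel live0).length := by
    have h1 := (ha.subperm (fun x hx => hinpeel x hx)).length_le
    have h2 := ((hp2 hl0).subperm (fun x hx => hpeel x hx)).length_le
    omega
  rw [pvLoopB]
  simp [hlen]

theorem pv_loopB_eq (N : Nat) :
    ∀ (alive : PySem.Set (Int × Int)) (stack : List (Int × Int)) (removed : Int)
      (live0 : List (Int × Int)),
      9 * alive.length + stack.length ≤ N →
      live0.Nodup → alive.Nodup →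
      (∀ x ∈ alive, x ∈ live0) →
      (∀ x ∈ pvPeel live0, x ∈ alive) →
      (∀ c ∈ alive, pvDeg alive c < 4 → c ∈ stack) →
      pvLoopB alive stack removed
        = removed + (alive.length : Int) - ((pvPeel live0).length : Int) := by
  induction N with
  | zero =>
    intro alive stack removed live0 hN hl0 ha hsub hpeel hstk
    obtain rfl : stack = [] := List.length_eq_zero_iff.1 (by omega)
    exact pv_loopB_nil alive removed live0 hl0 ha hsub hpeel hstk
  | succ N ih =>
    intro alive stack removed live0 hN hl0 ha hsub hpeel hstk
    by_cases hs : stack = []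
    · subst hs
      exact pv_loopB_nil alive removed live0 hl0 ha hsub hpeel hstk
    · have hsplit : stack.dropLast ++ [stack.getLast hs] = stack :=
        List.dropLast_append_getLast hs
      have hrlen : stack.dropLast.length + 1 = stack.length := by
        have := congrArg List.length hsplit
        simpa using this
      have hmem_stack : ∀ x ∈ stack, x ∈ stack.dropLast ∨ x = stack.getLast hs := by
        intro x hx
        rw [← hsplit] at hx
        rcases List.mem_append.1 hx with h | h
        · exact Or.inl h
        · exact Or.inr (by simpa using h)
      set c := stack.getLast hs with hcdef
      rw [pvLoopB, dif_neg hs]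
      by_cases hc : PySem.Set.contains alive c
      · rw [if_pos hc]
        have hcm : c ∈ alive := (PySem.Set.contains_iff alive c).1 hc
        have hnbs_len : (pvNbsB alive c.1 c.2).length = pvDeg alive c := by
          simp only [pvNbsB, pvDeg, List.length_map, ← List.countP_eq_length_filter]
          apply List.countP_congr
          intro d _
          simp [PySem.Set.contains, List.contains_eq_mem]
        by_cases hlt : (pvNbsB alive c.1 c.2).length < 4
        · rw [if_pos hlt]
          have hdeg : pvDeg alive c < 4 := by omega
          have ha' : (PySem.Set.discard alive c).Nodup := PySem.Set.nodup_discard alive c ha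
          have hlen' : (PySem.Set.discard alive c).length + 1 = alive.length :=
            pv_discard_len alive c ha hcm
          have hsub' : ∀ x ∈ PySem.Set.discard alive c, x ∈ live0 := by
            intro x hx
            exact hsub x ((pv_discard_mem alive c x).1 hx).1
          have hcnotpeel : c ∉ pvPeel live0 := by
            intro hcp
            have h4 := (pv_peel_props live0.length live0 le_rfl).2.2 c hcp
            have hm := pv_deg_mono (pvPeel live0) alive hpeel c
            omega
          have hpeel' : ∀ x ∈ pvPeel live0, x ∈ PySem.Set.discard alive c := by
            intro x hx
            exact (pv_discard_mem alive c x).2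
              ⟨hpeel x hx, fun he => hcnotpeel (he ▸ hx)⟩
          have hstk' : ∀ c' ∈ PySem.Set.discard alive c,
              pvDeg (PySem.Set.discard alive c) c' < 4 →
                c' ∈ stack.dropLast ++ pvNbsB alive c.1 c.2 := by
            intro c' hc' hdeg'
            obtain ⟨hc'a, hc'ne⟩ := (pv_discard_mem alive c c').1 hc'
            by_cases hold : pvDeg alive c' < 4
            · rcases hmem_stack c' (hstk c' hc'a hold) with h | h
              · exact List.mem_append_left _ h
              · exact absurd h hc'ne
            · -- c' lost a neighbor: that neighbor must be c, so c' is a live neighbor of c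
              have hex : ∃ d ∈ pvDirB, ((c'.1 + d.1, c'.2 + d.2) ∈ alive) ∧
                  ¬ ((c'.1 + d.1, c'.2 + d.2) ∈ PySem.Set.discard alive c) := by
                by_contra hno
                push_neg at hno
                have hmono : pvDeg alive c' ≤ pvDeg (PySem.Set.discard alive c) c' := by
                  apply List.countP_mono_left
                  intro d hd hdm
                  simp only [decide_eq_true_eq] at hdm ⊢
                  exact hno d hd hdm
                omega
              obtain ⟨d, hd, hdm, hdnm⟩ := hex
              have heq : (c'.1 + d.1, c'.2 + d.2) = c := by
                by_contra hne
                exact hdnm ((pv_discard_mem alive c _).2 ⟨hdm, hne⟩)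
              have hneg : ((-d.1, -d.2) : Int × Int) ∈ pvDirB := by
                fin_cases hd <;> decide
              have hpair : (c.1 + -d.1, c.2 + -d.2) = c' := by
                have h1 : c'.1 + d.1 = c.1 := congrArg Prod.fst heq
                have h2 : c'.2 + d.2 = c.2 := congrArg Prod.snd heq
                refine Prod.ext ?_ ?_ <;> simp <;> omega
              refine List.mem_append_right _ ?_
              simp only [pvNbsB, List.mem_map, List.mem_filter]
              refine ⟨(-d.1, -d.2), ⟨hneg, ?_⟩, hpair⟩
              rw [hpair]
              exact (PySem.Set.contains_iff alive c').2 hc'a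
          have hrec := ih (PySem.Set.discard alive c)
            (stack.dropLast ++ pvNbsB alive c.1 c.2) (removed + 1) live0
            (by
              have h8 := pv_nbs_len_le alive c.1 c.2
              simp only [List.length_append]
              omega)
            hl0 ha' hsub' hpeel' hstk'
          rw [hrec]
          have hle : (pvPeel live0).length ≤ (PySem.Set.discard alive c).length :=
            ((pv_peel_props live0.length live0 le_rfl).2.1 hl0).subperm
              (fun x hx => hpeel' x hx) |>.length_le
          push_cast
          omega
        · rw [if_neg hlt]
          have hstk' : ∀ c' ∈ alive, pvDeg alive c' < 4 → c' ∈ stack.dropLast := by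
            intro c' hc' hdeg'
            rcases hmem_stack c' (hstk c' hc' hdeg') with h | h
            · exact h
            · exfalso
              rw [h] at hdeg'
              omega
          exact ih alive stack.dropLast removed live0 (by omega) hl0 ha hsub hpeel hstk'
      · rw [if_neg hc]
        have hcnot : c ∉ alive := fun h => hc ((PySem.Set.contains_iff alive c).2 h)
        have hstk' : ∀ c' ∈ alive, pvDeg alive c' < 4 → c' ∈ stack.dropLast := by
          intro c' hc' hdeg'
          rcases hmem_stack c' (hstk c' hc' hdeg') with h | h
          · exact h
          · exact absurd (h ▸ hc') hcnot
        exact ih alive stack.dropLast removed live0 (by omega) hl0 ha hsub hpeel hstk'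

-- ===== VERDICT (by name: the statement is the Claim_ definition above) =====
theorem part2_spec : Claim_equal_part2 := by
  intro g _ _
  unfold Spec_part2 part2 part2_alt
  set m : Int := (g.length : Int)
  set n : Int := ((PySem.List.pyGetD g 0 []).length : Int)
  have hnd : (pvLive g m n).Nodup := pv_live_nodup g m n
  have hofl : PySem.Set.ofList (pvLive g m n) = pvLive g m n :=
    PySem.Set.ofList_eq_self_of_nodup _ hnd
  have hA := pv_main (pvLive g m n).length g 0 true false le_rfl rfl
  have hB := pv_loopB_eq (9 * (pvLive g m n).length + (pvLive g m n).length)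
    (pvLive g m n) (pvLive g m n) 0 (pvLive g m n) le_rfl hnd hnd
    (fun x hx => hx)
    (fun x hx => (pv_peel_props (pvLive g m n).length (pvLive g m n) le_rfl).1 x hx)
    (fun c hc _ => hc)
  show pvLoopA true false 0 g = pvLoopB (PySem.Set.ofList (pvLive g m n)) (pvLive g m n) 0
  rw [hofl, hA, hB]
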